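-- pv_equiv track=rewrite | github.com/nchatter/bdh-final-project | gatech/src/pull_oscar_data.py | get_dddefault_count
-- ===== SOURCE A (Python) =====
-- def get_dddefault_count(lines):
--     count = 0
--     next_course = False
--     for line in lines:
--         if 'dddefault' in line:
--             count += 1
--         if 'ddtitle' in line or 'Return to Previous' in line:
--             return count, True
--     return count, next_course
-- ===== SOURCE B (Python) =====
-- def get_dddefault_count(lines):
--     lines = list(lines)
--     stop = next((i for i, l in enumerate(lines)
--                  if 'ddtitle' in l or 'Return to Previous' in l), None)
--     if stop is None:
--         return sum('dddefault' in l for l in lines), False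
--     return sum('dddefault' in l for l in lines[:stop + 1]), True
-- ===== Notes on version B (the rewrite author's own statement) =====
-- stated objective: alternative
-- what changed: Replaces A's single interleaved count-and-check loop with a locate-boundary step (first index of a terminator line) followed by a separate count of 'dddefault' lines over the relevant prefix.
import Mathlib
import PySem

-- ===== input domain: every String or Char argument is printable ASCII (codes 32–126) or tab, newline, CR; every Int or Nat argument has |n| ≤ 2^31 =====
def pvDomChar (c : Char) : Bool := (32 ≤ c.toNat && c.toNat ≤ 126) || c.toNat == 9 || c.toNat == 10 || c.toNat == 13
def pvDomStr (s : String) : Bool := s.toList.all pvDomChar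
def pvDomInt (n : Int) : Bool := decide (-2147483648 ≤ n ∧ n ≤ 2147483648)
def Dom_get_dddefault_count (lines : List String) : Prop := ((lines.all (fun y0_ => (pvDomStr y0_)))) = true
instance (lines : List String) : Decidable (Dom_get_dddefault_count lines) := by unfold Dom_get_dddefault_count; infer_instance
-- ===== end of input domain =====

-- B replaces A's single interleaved count-and-check loop by a locate-terminator step then a separate prefix count (alternative decomposition, same cost).
-- ===== PORT A =====
def getDDLoop : List String → Int → Int × Bool
  | [], count => (count, false)
  | line :: rest, count =>
    let count := if PySem.Str.isIn "dddefault" line then count + 1 else count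
    if PySem.Str.isIn "ddtitle" line || PySem.Str.isIn "Return to Previous" line then
      (count, true)
    else
      getDDLoop rest count

def get_dddefault_count (lines : List String) : Int × Bool :=
  getDDLoop lines 0

-- ===== PORT B =====
def isTermLine (l : String) : Bool :=
  PySem.Str.isIn "ddtitle" l || PySem.Str.isIn "Return to Previous" l

def get_dddefault_count_alt (lines : List String) : Int × Bool :=
  match lines.findIdx? isTermLine with
  | none   => ((lines.countP (fun l => PySem.Str.isIn "dddefault" l) : Int), false)
  | some i => (((lines.take (i + 1)).countP (fun l => PySem.Str.isIn "dddefault" l) : Int), true)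

-- ===== PRECONDITION & SPEC =====
def Spec_get_dddefault_count (lines : List String) (out : Int × Bool) : Prop := out = get_dddefault_count_alt lines
instance (lines : List String) (out : Int × Bool) : Decidable (Spec_get_dddefault_count lines out) := by unfold Spec_get_dddefault_count; infer_instance

-- ===== CLAIM (what is proved, stated in full; the proofs are below) =====
def Claim_equal_get_dddefault_count : Prop := ∀ (lines : List String), Dom_get_dddefault_count lines → Spec_get_dddefault_count lines (get_dddefault_count lines)

-- ===== LEMMAS AND PROOFS =====

-- ===== VERDICT (by name: the statement is the Claim_ definition above) =====
lemma getDDLoop_eq (lines : List String) : ∀ (c : Int),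
    getDDLoop lines c = (c + (get_dddefault_count_alt lines).1, (get_dddefault_count_alt lines).2) := by
  induction lines with
  | nil => intro c; simp [getDDLoop, get_dddefault_count_alt]
  | cons l ls ih =>
    intro c
    by_cases hm : isTermLine l = true
    · have hm2 : (PySem.Str.isIn "ddtitle" l || PySem.Str.isIn "Return to Previous" l) = true := hm
      simp only [getDDLoop, get_dddefault_count_alt, List.findIdx?_cons, hm,
        List.take_succ_cons, List.take_zero, List.countP_cons, List.countP_nil, hm2, if_true]
      split <;> simp
    · have hm' : isTermLine l = false := by simpa using hm
      simp only [getDDLoop, get_dddefault_count_alt, List.findIdx?_cons, hm']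
      have : (PySem.Str.isIn "ddtitle" l || PySem.Str.isIn "Return to Previous" l) = false := hm'
      simp only [this, if_false, Bool.false_eq_true]
      rw [ih]
      rcases hfi : ls.findIdx? isTermLine with _ | i
      · simp only [get_dddefault_count_alt, hfi, List.countP_cons]
        split <;> simp <;> ring
      · simp only [get_dddefault_count_alt, hfi, Option.map_some, List.take_succ_cons,
          List.countP_cons]
        split <;> simp <;> ring

theorem get_dddefault_count_spec : Claim_equal_get_dddefault_count := by
  intro lines _
  unfold Spec_get_dddefault_count get_dddefault_count
  rw [getDDLoop_eq]
  simp
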